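-- pv_equiv track=rewrite | github.com/shiva-aditya/codemind-python | Amicable_Numbers.py | po
-- ===== SOURCE A (Python) =====
-- def po(n,m):
--     c=1
--     for i in range(2,n):
--         if n%i==0:
--             c=c+i
--     if c==m:
--         return "Amicable"
--     else:
--         return "Not Amicable"
-- ===== SOURCE B (Python) =====
-- def po(n, m):
--     s = 1
--     i = 2
--     while i * i <= n:
--         if n % i == 0:
--             s += i
--             j = n // i
--             if j != i:
--                 s += j
--         i += 1
--     return "Amicable" if s == m else "Not Amicable"
-- ===== Notes on version B (the rewrite author's own statement) =====
-- stated objective: faster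
-- what changed: Replaces the linear scan of all candidates 2..n-1 with a sqrt(n) loop that adds each divisor together with its cofactor n//i.
import Mathlib
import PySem

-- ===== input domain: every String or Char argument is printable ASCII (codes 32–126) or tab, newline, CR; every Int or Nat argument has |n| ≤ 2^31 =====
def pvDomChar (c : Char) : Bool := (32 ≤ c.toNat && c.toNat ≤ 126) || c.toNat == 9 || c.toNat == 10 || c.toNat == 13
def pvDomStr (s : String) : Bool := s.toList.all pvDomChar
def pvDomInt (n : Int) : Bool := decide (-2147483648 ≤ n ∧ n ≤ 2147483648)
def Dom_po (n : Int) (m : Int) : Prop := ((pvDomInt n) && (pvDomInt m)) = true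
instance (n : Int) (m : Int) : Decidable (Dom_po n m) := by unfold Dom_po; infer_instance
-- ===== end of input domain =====

-- B replaces A's linear scan over 2..n-1 with a loop up to sqrt(n) adding each divisor with its cofactor n//i.

-- ===== PORT A =====
def po (n : Int) (m : Int) : String :=
  let c := (PySem.List.pyRange 2 n 1).foldl
    (fun c i => if PySem.Int.mod n i = 0 then c + i else c) 1
  if c = m then "Amicable" else "Not Amicable"

-- ===== PORT B =====
-- the while loop of Source B; terminates because i ≤ n whenever i*i ≤ n
def poAltLoop (n : Int) (i : Int) (s : Int) : Int :=
  if h : i * i ≤ n then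
    poAltLoop n (i + 1)
      (if PySem.Int.mod n i = 0 then
        (let j := PySem.Int.floordiv n i;
         if j ≠ i then s + i + j else s + i)
       else s)
  else s
termination_by (n + 1 - i).toNat
decreasing_by
  have h1 : 2 * i ≤ n + 1 := by nlinarith [sq_nonneg (i - 1)]
  have h2 : 0 ≤ n := le_trans (mul_self_nonneg i) h
  omega

def po_alt (n : Int) (m : Int) : String :=
  let s := poAltLoop n 2 1
  if s = m then "Amicable" else "Not Amicable"

-- ===== PRECONDITION & SPEC =====
def Spec_po (n : Int) (m : Int) (out : String) : Prop := out = po_alt n m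
instance (n : Int) (m : Int) (out : String) : Decidable (Spec_po n m out) := by unfold Spec_po; infer_instance

-- ===== CLAIM (what is proved, stated in full; the proofs are below) =====
def Claim_equal_po : Prop := ∀ (n : Int) (m : Int), Dom_po n m → Spec_po n m (po n m)

-- ===== LEMMAS AND PROOFS =====

-- the set of proper divisors d ∈ [2, n) with both d and its cofactor n/d still ≥ i
def divsFrom (n : Int) (i : Int) : Finset Int :=
  (PySem.List.pyRange 2 n 1).toFinset.filter (fun d => n % d = 0 ∧ i ≤ d ∧ i ≤ n / d)

lemma mem_divsFrom (n i d : Int) :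
    d ∈ divsFrom n i ↔ (2 ≤ d ∧ d < n) ∧ d ∣ n ∧ i ≤ d ∧ i ≤ n / d := by
  unfold divsFrom
  rw [Finset.mem_filter, List.mem_toFinset, PySem.List.mem_pyRange_one,
    PySem.Int.emod_eq_zero_iff_dvd]

-- A's loop shape: conditional accumulation is the sum of the filtered list
lemma foldl_if_add (p : Int → Prop) [DecidablePred p] (l : List Int) (c : Int) :
    l.foldl (fun c i => if p i then c + i else c) c = c + (l.filter (fun i => p i)).sum := by
  induction l generalizing c with
  | nil => simp
  | cons x xs ih =>
    simp only [List.foldl_cons, List.filter_cons]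
    by_cases hx : p x <;> simp [hx, ih, List.sum_cons] <;> ring

-- sum of a filtered nodup list is the Finset sum over its toFinset
lemma sum_filter_toFinset (l : List Int) (p : Int → Prop) [DecidablePred p] (h : l.Nodup) :
    (l.filter (fun i => p i)).sum = ∑ x ∈ l.toFinset.filter (fun x => p x), x := by
  have h2 : l.toFinset.filter (fun x => p x) = (l.filter (fun x => p x)).toFinset := by
    ext x
    simp [Finset.mem_filter]
  rw [h2, List.sum_toFinset _ (h.filter _)]
  simp

-- in [2, n) a small divisor i pairs with the cofactor n/i, and they exhaust the step from i to i+1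
lemma divsFrom_step (n i : Int) (hi : 2 ≤ i) (hsq : i * i ≤ n) :
    ∑ d ∈ divsFrom n i, d
      = (if n % i = 0 then (i + if n / i ≠ i then n / i else 0) else 0)
        + ∑ d ∈ divsFrom n (i + 1), d := by
  have hipos : 0 < i := by omega
  have hin : i < n := by nlinarith
  have hsplit := Finset.sum_filter_add_sum_filter_not (divsFrom n i)
      (fun d => i + 1 ≤ d ∧ i + 1 ≤ n / d) (fun d => d)
  have h1 : (divsFrom n i).filter (fun d => i + 1 ≤ d ∧ i + 1 ≤ n / d) = divsFrom n (i + 1) := by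
    unfold divsFrom
    rw [Finset.filter_filter]
    apply Finset.filter_congr
    intro d _
    constructor
    · rintro ⟨⟨hd, _⟩, h2⟩; exact ⟨hd, h2⟩
    · rintro ⟨hd, h2, h3⟩; exact ⟨⟨hd, by omega, by omega⟩, h2, h3⟩
  have h2 : (divsFrom n i).filter (fun d => ¬ (i + 1 ≤ d ∧ i + 1 ≤ n / d))
      = if n % i = 0 then ({i, n / i} : Finset Int) else ∅ := by
    ext d
    rw [Finset.mem_filter, mem_divsFrom]
    constructor
    · rintro ⟨⟨⟨h2d, hdn⟩, hdvd, hid, hiq⟩, hnot⟩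
      have hcase : d = i ∨ n / d = i := by omega
      rcases hcase with rfl | hqi
      · rw [if_pos (Int.emod_eq_zero_of_dvd hdvd)]
        exact Finset.mem_insert_self _ _
      · have hq := Int.ediv_mul_cancel hdvd
        rw [hqi] at hq
        have hidvd : i ∣ n := ⟨d, by linarith [mul_comm d i]⟩
        have hni : n / i = d := Int.ediv_eq_of_eq_mul_left (by omega) (by linarith [mul_comm d i])
        rw [if_pos (Int.emod_eq_zero_of_dvd hidvd)]
        rw [Finset.mem_insert, Finset.mem_singleton, hni]
        right; rfl
    · intro hd
      by_cases hidvd : i ∣ n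
      · rw [if_pos (Int.emod_eq_zero_of_dvd hidvd), Finset.mem_insert, Finset.mem_singleton] at hd
        have hq : n / i * i = n := Int.ediv_mul_cancel hidvd
        have hile : i ≤ n / i := (Int.le_ediv_iff_mul_le hipos).mpr hsq
        have hq2 : 2 ≤ n / i := by omega
        rcases hd with rfl | rfl
        · exact ⟨⟨⟨hi, hin⟩, hidvd, le_refl _, hile⟩, by omega⟩
        · have hqlt : n / i < n := by nlinarith
          have hnq : n / (n / i) = i := Int.ediv_eq_of_eq_mul_left (by omega)
            (by linarith [hq, mul_comm (n / i) i])
          refine ⟨⟨⟨hq2, hqlt⟩, Int.ediv_dvd_of_dvd hidvd, hile, ?_⟩, ?_⟩ <;> rw [hnq] <;> omega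
      · rw [if_neg (fun h => hidvd (Int.dvd_of_emod_eq_zero h))] at hd
        exact absurd hd (Finset.notMem_empty d)
  rw [h1] at hsplit
  rw [← hsplit, h2, add_comm]
  congr 1
  by_cases hidvd : i ∣ n
  · have hmod := Int.emod_eq_zero_of_dvd hidvd
    by_cases hqe : n / i = i
    · simp [hmod, hqe]
    · rw [if_pos hmod, if_pos hqe,
          Finset.sum_pair (fun h => hqe h.symm), if_pos hmod]
  · have hmod : ¬ n % i = 0 := fun h => hidvd (Int.dvd_of_emod_eq_zero h)
    simp [hmod]

-- past sqrt(n) nothing with both halves ≥ i is left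
lemma divsFrom_empty (n i : Int) (hi : 2 ≤ i) (hsq : ¬ i * i ≤ n) :
    divsFrom n i = ∅ := by
  rw [Finset.eq_empty_iff_forall_notMem]
  intro d hd
  rw [mem_divsFrom] at hd
  obtain ⟨⟨h2d, hdn⟩, hdvd, h1, h2⟩ := hd
  have hq : n / d * d = n := Int.ediv_mul_cancel hdvd
  nlinarith

-- loop invariant for B
lemma poAltLoop_eq (n : Int) : ∀ (k : Nat) (i s : Int), 2 ≤ i → (n + 1 - i).toNat ≤ k →
    poAltLoop n i s = s + ∑ d ∈ divsFrom n i, d := by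
  intro k
  induction k with
  | zero =>
    intro i s hi hk
    have hni : n < i := by omega
    rw [poAltLoop, dif_neg (by nlinarith), divsFrom_empty n i hi (by nlinarith)]
    simp
  | succ k ih =>
    intro i s hi hk
    rw [poAltLoop]
    by_cases hsq : i * i ≤ n
    · rw [dif_pos hsq]
      have hin : i < n := by nlinarith
      rw [ih (i + 1) _ (by omega) (by omega), divsFrom_step n i hi hsq]
      have hmod : (PySem.Int.mod n i = 0) ↔ n % i = 0 := by
        rw [PySem.Int.mod_eq_emod_of_pos (by omega : (0:Int) < i)]
      rw [PySem.Int.floordiv_eq_ediv_of_pos (by omega)]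
      by_cases hdvd : n % i = 0
      · rw [if_pos (hmod.mpr hdvd), if_pos hdvd]
        by_cases hqe : n / i ≠ i
        · rw [if_pos hqe, if_pos hqe]; ring
        · rw [if_neg hqe, if_neg hqe]; ring
      · rw [if_neg (fun h => hdvd (hmod.mp h)), if_neg hdvd]
        ring
    · rw [dif_neg hsq, divsFrom_empty n i hi hsq]
      simp

-- every proper divisor ≥ 2 has its cofactor ≥ 2, so the extra condition at i = 2 is vacuous
lemma filter_mod_eq_divsFrom_two (n : Int) (hn : 4 ≤ n) :
    (PySem.List.pyRange 2 n 1).toFinset.filter (fun d => PySem.Int.mod n d = 0)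
      = divsFrom n 2 := by
  unfold divsFrom
  apply Finset.filter_congr
  intro d hd
  rw [List.mem_toFinset, PySem.List.mem_pyRange_one] at hd
  rw [PySem.Int.mod_eq_emod_of_pos (by omega : (0:Int) < d)]
  constructor
  · intro hdvd
    have hq : n / d * d = n := Int.ediv_mul_cancel (Int.dvd_of_emod_eq_zero hdvd)
    have h2 : 2 ≤ n / d := by nlinarith [hd.1, hd.2]
    exact ⟨hdvd, hd.1, h2⟩
  · rintro ⟨hdvd, _⟩; exact hdvd

lemma core_eq (n : Int) :
    (PySem.List.pyRange 2 n 1).foldl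
      (fun c i => if PySem.Int.mod n i = 0 then c + i else c) 1
    = poAltLoop n 2 1 := by
  rcases (show n ≤ 3 ∨ 4 ≤ n by omega) with hn | hn
  · -- the while loop never runs; A's range is empty or just the non-divisor 2
    rw [poAltLoop, dif_neg (by omega)]
    rcases (show n ≤ 2 ∨ n = 3 by omega) with hn2 | hn2
    · rw [PySem.List.pyRange_one_eq_nil (by omega)]; rfl
    · subst hn2; decide
  · rw [foldl_if_add, sum_filter_toFinset _ _ (PySem.List.nodup_pyRange_one 2 n),
        filter_mod_eq_divsFrom_two n hn,
        poAltLoop_eq n (n + 1 - 2).toNat 2 1 (by omega) (by omega)]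

-- ===== VERDICT (by name: the statement is the Claim_ definition above) =====
theorem po_spec : Claim_equal_po := by
  intro n m _
  unfold Spec_po po po_alt
  rw [core_eq]
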